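-- pv_equiv track=rewrite | github.com/Lincito-31/Preseleccion | Codechef/Compete/Starters 171/F.py | bigmod
-- ===== SOURCE A (Python) =====
-- def bigmod(base,power):
--   p=1
--   while(power>0):
--     if(power%2==1):
--       p*=base
--     base*=base
--     power//=2
--   return p
-- ===== SOURCE B (Python) =====
-- def bigmod(base, power):
--     acc = 1
--     if power > 0:
--         for bit in bin(power)[2:]:
--             acc *= acc
--             if bit == '1':
--                 acc *= base
--     return acc
-- ===== Notes on version B (the rewrite author's own statement) =====
-- stated objective: alternative
-- what changed: Replaced A's LSB-first loop (which repeatedly squares the full-size base, including one wasted largest squaring) with MSB-first binary exponentiation: fold over the binary digits of power squaring the accumulator and multiplying in the original small base on 1-bits.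
import Mathlib
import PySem

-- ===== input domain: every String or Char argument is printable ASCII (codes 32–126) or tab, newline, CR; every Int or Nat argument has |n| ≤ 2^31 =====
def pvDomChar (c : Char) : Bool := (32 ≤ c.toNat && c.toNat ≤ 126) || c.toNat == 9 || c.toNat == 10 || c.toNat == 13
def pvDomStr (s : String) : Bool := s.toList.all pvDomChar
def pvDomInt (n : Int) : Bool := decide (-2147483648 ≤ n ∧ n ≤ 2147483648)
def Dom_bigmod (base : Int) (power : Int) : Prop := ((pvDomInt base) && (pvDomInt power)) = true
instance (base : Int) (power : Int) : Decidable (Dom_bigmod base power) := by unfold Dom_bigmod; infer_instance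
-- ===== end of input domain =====

-- B replaces A's LSB-first squaring loop with an MSB-first fold over power's binary digits (alternative decomposition, same cost).


-- ===== PORT A =====
-- A's while loop: state (base, power, p); each iteration multiplies p by base if the low bit
-- of power is set, squares base, and halves power with Python floor division.
def bigmodLoop (base power p : Int) : Int :=
  if h : power > 0 then
    bigmodLoop (base * base) (PySem.Int.floordiv power 2)
      (if PySem.Int.mod power 2 = 1 then p * base else p)
  else p
termination_by power.toNat
decreasing_by
  have := PySem.Int.floordiv_eq_ediv_of_pos (a := power) (b := 2) (by omega)
  rw [this]; omega

def bigmod (base : Int) (power : Int) : Int := bigmodLoop base power 1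

-- ===== PORT B =====
-- bin(power)[2:] for power > 0: the binary digits of power, most significant first,
-- each digit rendered as the Bool "digit = 1".
def binDigits (n : Nat) : List Bool :=
  if n = 0 then [] else binDigits (n / 2) ++ [decide (n % 2 = 1)]

-- B: for each binary digit of power (MSB first) square acc, multiplying in base on 1-digits.
def bigmod_alt (base : Int) (power : Int) : Int :=
  if power > 0 then
    (binDigits power.toNat).foldl
      (fun acc bit => if bit then acc * acc * base else acc * acc) 1
  else 1

-- ===== PRECONDITION & SPEC =====
def Spec_bigmod (base : Int) (power : Int) (out : Int) : Prop := out = bigmod_alt base power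
instance (base : Int) (power : Int) (out : Int) : Decidable (Spec_bigmod base power out) := by unfold Spec_bigmod; infer_instance

-- ===== CLAIM (what is proved, stated in full; the proofs are below) =====
def Claim_equal_bigmod : Prop := ∀ (base : Int) (power : Int), Dom_bigmod base power → Spec_bigmod base power (bigmod base power)

-- ===== LEMMAS AND PROOFS =====

theorem binDigits_fold (base : Int) (n : Nat) :
    (binDigits n).foldl (fun acc bit => if bit then acc * acc * base else acc * acc) 1
      = base ^ n := by
  induction n using Nat.strong_induction_on with
  | _ n ih =>
    rw [binDigits]
    by_cases h : n = 0
    · simp [h]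
    · simp only [h, if_false, List.foldl_append, List.foldl_cons, List.foldl_nil]
      rw [ih (n / 2) (by omega)]
      have hn : n = 2 * (n / 2) + n % 2 := by omega
      by_cases hb : n % 2 = 1
      · simp only [hb, decide_true, if_true]
        conv_rhs => rw [hn, hb]
        rw [pow_add, pow_mul, pow_one]; ring
      · have hz : n % 2 = 0 := by omega
        simp only [hb, decide_false, Bool.false_eq_true, if_false]
        conv_rhs => rw [hn, hz]
        rw [Nat.add_zero, pow_mul]; ring

theorem bigmod_alt_closed (base : Int) (power : Int) :
    bigmod_alt base power = base ^ power.toNat := by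
  rw [bigmod_alt]
  by_cases h : power > 0
  · rw [if_pos h, binDigits_fold]
  · have h0 : power.toNat = 0 := by omega
    simp [h, h0]

theorem bigmodLoop_closed : ∀ (base power p : Int), bigmodLoop base power p = p * base ^ power.toNat := by
  intro base power p
  induction base, power, p using bigmodLoop.induct with
  | case1 base power p h ih =>
    rw [bigmodLoop]
    simp only [h, dite_true]
    simp only [dite_eq_ite] at ih
    have h2 := PySem.Int.floordiv_eq_ediv_of_pos (a := power) (b := 2) (by omega)
    have hm := PySem.Int.mod_eq_emod_of_pos (a := power) (b := 2) (by omega)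
    have hpow : power.toNat = 2 * (PySem.Int.floordiv power 2).toNat + (PySem.Int.mod power 2).toNat := by
      rw [h2, hm]; omega
    by_cases hodd : PySem.Int.mod power 2 = 1
    · rw [ih, if_pos hodd, hpow, hodd]; simp only [Int.toNat_one, pow_one]; ring
    · have hz : PySem.Int.mod power 2 = 0 := by rw [hm] at hodd ⊢; omega
      rw [ih, if_neg hodd, hpow, hz]; simp only [Int.toNat_zero, pow_zero, mul_one]; ring
  | case2 base power p h =>
    have h0 : power.toNat = 0 := by omega
    rw [bigmodLoop]
    simp [h, h0]

-- ===== VERDICT (by name: the statement is the Claim_ definition above) =====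
theorem bigmod_spec : Claim_equal_bigmod := by
  intro base power _
  unfold Spec_bigmod bigmod
  rw [bigmodLoop_closed, bigmod_alt_closed, one_mul]
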